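-- pv_equiv track=rewrite | github.com/jefinagilbert/problemSolving | hr92_gemStones.py | gemstones
-- ===== SOURCE A (Python) =====
-- def gemstones(arr):
--     j = ''
--     a = 0
--     llist = []
--     for i in arr:
--         if len(i) > len(j):
--             j = i
--     for i in j:
--         if i in llist:
--             continue
--         for k in arr:
--             if i in k:
--                 pass
--             else:
--                 a = 1
--                 break
--         if a == 1:
--             a = 0
--         else:
--             llist.append(i)
--     return len(llist)
--
-- arr = ['abcdde', 'baccd', 'eeabg']
-- ===== SOURCE B (Python) =====
-- def gemstones(arr):
--     if not arr:
--         return 0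
--     common = set(arr[0])
--     for s in arr[1:]:
--         if not common:
--             break
--         common = {c for c in common if c in s}
--     return len(common)
-- ===== Notes on version B (the rewrite author's own statement) =====
-- stated objective: alternative
-- what changed: A scans the chars of the longest string and re-scans every string per char with a break flag; B inverts the loops: one pass over the strings that shrinks a candidate set (initialised from the first string) and stops early when it empties.
import Mathlib
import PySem

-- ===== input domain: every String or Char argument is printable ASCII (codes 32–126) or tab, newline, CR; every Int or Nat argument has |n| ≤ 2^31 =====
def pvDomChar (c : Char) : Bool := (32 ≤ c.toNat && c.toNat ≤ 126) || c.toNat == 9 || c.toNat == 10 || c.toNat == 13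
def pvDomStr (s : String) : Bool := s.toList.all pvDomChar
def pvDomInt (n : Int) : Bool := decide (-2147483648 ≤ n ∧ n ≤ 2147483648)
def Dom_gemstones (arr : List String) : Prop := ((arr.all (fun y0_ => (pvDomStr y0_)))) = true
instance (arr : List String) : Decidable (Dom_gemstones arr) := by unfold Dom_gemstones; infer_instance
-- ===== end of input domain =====

-- B inverts A's loop structure: instead of scanning the chars of the longest string and
-- re-scanning every string per char, B makes one pass over the strings, shrinking a
-- candidate character set and stopping early when it empties (objective: alternative).

-- ===== PORT A =====
-- inner 'for k in arr: if i in k: pass else: a = 1; break' — the break is modelled by the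
-- sticky flag (once a = 1 it stays 1); 'i in k' for the single char i is char membership, exact.
def gemstonesInner (arr : List String) (i : Char) : Int :=
  arr.foldl (fun a k => if a = 1 then a else if i ∈ k.toList then a else 1) 0

def gemstones (arr : List String) : Int :=
  -- j = '' ; for i in arr: if len(i) > len(j): j = i
  let j := arr.foldl (fun j i => if PySem.Str.len i > PySem.Str.len j then i else j) ""
  -- a is reset to 0 whichever branch is taken, so it is 0 at the start of each outer iteration
  let llist := j.toList.foldl (fun llist i =>
    if llist.contains i then llist
    else if gemstonesInner arr i = 1 then llist else llist ++ [i]) ([] : List Char)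
  (llist.length : Int)

-- ===== PORT B =====
-- 'if not common: break' is modelled by the fold leaving [] unchanged (the remaining
-- iterations are no-ops on the empty set); the set comprehension filters common in its
-- iteration order; 'c in s' for the char c is char membership, exact.
def gemstones_alt (arr : List String) : Int :=
  match arr with
  | [] => 0
  | s :: rest =>
    let common := rest.foldl
      (fun c t => if c = [] then c else c.filter (fun ch => decide (ch ∈ t.toList)))
      (PySem.Set.ofList s.toList)
    (PySem.Set.len common : Int)

-- ===== PRECONDITION & SPEC =====
def Spec_gemstones (arr : List String) (out : Int) : Prop := out = gemstones_alt arr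
instance (arr : List String) (out : Int) : Decidable (Spec_gemstones arr out) := by unfold Spec_gemstones; infer_instance

-- ===== CLAIM (what is proved, stated in full; the proofs are below) =====
def Claim_equal_gemstones : Prop := ∀ (arr : List String), Dom_gemstones arr → Spec_gemstones arr (gemstones arr)

-- ===== LEMMAS AND PROOFS =====

-- the sticky flag stays 1
lemma inner_sticky (arr : List String) (i : Char) :
    arr.foldl (fun a k => if a = 1 then a else if i ∈ k.toList then a else 1) (1 : Int) = 1 := by
  induction arr with
  | nil => rfl
  | cons k ks ih => simpa using ih

-- the inner loop returns 0 exactly when i occurs in every string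
lemma inner_eq_zero_iff (arr : List String) (i : Char) :
    gemstonesInner arr i = 0 ↔ ∀ k ∈ arr, i ∈ k.toList := by
  induction arr with
  | nil => simp [gemstonesInner]
  | cons k ks ih =>
    by_cases h : i ∈ k.toList
    · simp only [gemstonesInner, List.foldl_cons] at ih ⊢
      simp only [if_pos h]
      norm_num
      rw [ih]
      constructor
      · intro hall; exact ⟨h, hall⟩
      · intro hall; exact hall.2
    · have hstep : (if (0:Int) = 1 then (0:Int) else if i ∈ k.toList then 0 else 1) = 1 := by
        simp [h]
      unfold gemstonesInner
      rw [List.foldl_cons, hstep, inner_sticky]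
      simp [h]

lemma inner_zero_or_one (arr : List String) (i : Char) :
    gemstonesInner arr i = 0 ∨ gemstonesInner arr i = 1 := by
  induction arr with
  | nil => left; rfl
  | cons k ks ih =>
    by_cases h : i ∈ k.toList
    · simpa [gemstonesInner, h] using ih
    · have hstep : (if (0:Int) = 1 then (0:Int) else if i ∈ k.toList then 0 else 1) = 1 := by
        simp [h]
      right
      unfold gemstonesInner
      rw [List.foldl_cons, hstep, inner_sticky]

-- characterisation of A's llist fold
lemma llist_fold_spec (arr : List String) (cs : List Char) (acc : List Char) (hnd : acc.Nodup) :
    (cs.foldl (fun llist i =>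
      if llist.contains i then llist
      else if gemstonesInner arr i = 1 then llist else llist ++ [i]) acc).Nodup ∧
    ∀ c, c ∈ (cs.foldl (fun llist i =>
      if llist.contains i then llist
      else if gemstonesInner arr i = 1 then llist else llist ++ [i]) acc) ↔
        (c ∈ acc ∨ (c ∈ cs ∧ ∀ k ∈ arr, c ∈ k.toList)) := by
  induction cs generalizing acc with
  | nil => simpa using hnd
  | cons i cs ih =>
    by_cases hmem : i ∈ acc
    · have hc : acc.contains i = true := by simpa [List.contains_eq_mem] using hmem
      have := ih acc hnd
      simp only [List.foldl_cons]
      rw [if_pos hc]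
      refine ⟨this.1, fun c => ?_⟩
      rw [this.2 c]
      constructor
      · rintro (h | ⟨h1, h2⟩)
        · exact Or.inl h
        · exact Or.inr ⟨List.mem_cons_of_mem _ h1, h2⟩
      · rintro (h | ⟨h1, h2⟩)
        · exact Or.inl h
        · rcases List.mem_cons.mp h1 with h1 | h1
          · subst h1; exact Or.inl hmem
          · exact Or.inr ⟨h1, h2⟩
    · have hc : acc.contains i = false := by simpa [List.contains_eq_mem] using hmem
      by_cases hall : ∀ k ∈ arr, i ∈ k.toList
      · have hz : gemstonesInner arr i = 0 := (inner_eq_zero_iff arr i).mpr hall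
        have hnd' : (acc ++ [i]).Nodup := by
          simp [List.nodup_append, hnd]
          intro a ha hai; exact hmem (hai ▸ ha)
        have := ih (acc ++ [i]) hnd'
        have c1 : ¬ (acc.contains i = true) := by
          simp only [List.contains_eq_mem, decide_eq_true_eq]; exact hmem
        have c2 : ¬ (gemstonesInner arr i = 1) := by rw [hz]; norm_num
        simp only [List.foldl_cons]
        rw [if_neg c1, if_neg c2]
        refine ⟨this.1, fun c => ?_⟩
        rw [this.2 c]
        simp only [List.mem_append, List.mem_cons, List.not_mem_nil, or_false]
        constructor
        · rintro ((h | h) | ⟨h1, h2⟩)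
          · exact Or.inl h
          · subst h; exact Or.inr ⟨Or.inl rfl, hall⟩
          · exact Or.inr ⟨Or.inr h1, h2⟩
        · rintro (h | ⟨(h1 | h1), h2⟩)
          · exact Or.inl (Or.inl h)
          · subst h1; exact Or.inl (Or.inr rfl)
          · exact Or.inr ⟨h1, h2⟩
      · have hz : gemstonesInner arr i = 1 := by
          rcases inner_zero_or_one arr i with h | h
          · exact absurd ((inner_eq_zero_iff arr i).mp h) hall
          · exact h
        have := ih acc hnd
        have c1 : ¬ (acc.contains i = true) := by
          simp only [List.contains_eq_mem, decide_eq_true_eq]; exact hmem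
        simp only [List.foldl_cons]
        rw [if_neg c1, if_pos hz]
        refine ⟨this.1, fun c => ?_⟩
        rw [this.2 c]
        constructor
        · rintro (h | ⟨h1, h2⟩)
          · exact Or.inl h
          · exact Or.inr ⟨List.mem_cons_of_mem _ h1, h2⟩
        · rintro (h | ⟨h1, h2⟩)
          · exact Or.inl h
          · rcases List.mem_cons.mp h1 with h1 | h1
            · subst h1; exact absurd h2 hall
            · exact Or.inr ⟨h1, h2⟩

-- characterisation of B's shrinking-filter fold
lemma common_fold_spec (rest : List String) (c0 : List Char) (hnd : c0.Nodup) :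
    (rest.foldl (fun c t => if c = [] then c else c.filter (fun ch => decide (ch ∈ t.toList))) c0).Nodup ∧
    ∀ x, x ∈ rest.foldl (fun c t => if c = [] then c else c.filter (fun ch => decide (ch ∈ t.toList))) c0 ↔
      (x ∈ c0 ∧ ∀ t ∈ rest, x ∈ t.toList) := by
  induction rest generalizing c0 with
  | nil => simpa using hnd
  | cons t ts ih =>
    simp only [List.foldl_cons]
    by_cases hc : c0 = []
    · rw [if_pos hc]
      have := ih c0 hnd
      refine ⟨this.1, fun x => ?_⟩
      rw [this.2 x]
      subst hc
      simp
    · rw [if_neg hc]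
      have hnd' : (c0.filter (fun ch => decide (ch ∈ t.toList))).Nodup := hnd.filter _
      have := ih _ hnd'
      refine ⟨this.1, fun x => ?_⟩
      rw [this.2 x, List.mem_filter]
      simp only [decide_eq_true_eq]
      constructor
      · rintro ⟨⟨h1, h2⟩, h3⟩
        refine ⟨h1, fun u hu => ?_⟩
        rcases List.mem_cons.mp hu with h | h
        · subst h; exact h2
        · exact h3 u h
      · rintro ⟨h1, h2⟩
        exact ⟨⟨h1, h2 t List.mem_cons_self⟩, fun u hu => h2 u (List.mem_cons_of_mem _ hu)⟩

-- the running maximum is at least the start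
lemma pick_ge_start (t : List String) (s : String) :
    PySem.Str.len s ≤ PySem.Str.len
      (t.foldl (fun j i => if PySem.Str.len i > PySem.Str.len j then i else j) s) := by
  induction t generalizing s with
  | nil => simp
  | cons u us ih =>
    simp only [List.foldl_cons]
    split_ifs with hcmp
    · exact le_trans (le_of_lt hcmp) (ih u)
    · exact ih s

-- the running maximum is at least every element
lemma pick_len_ge (arr : List String) (x : String) :
    x ∈ arr → ∀ s0 : String, PySem.Str.len x ≤ PySem.Str.len
      (arr.foldl (fun j i => if PySem.Str.len i > PySem.Str.len j then i else j) s0) := by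
  induction arr with
  | nil => intro hx; cases hx
  | cons h t ih =>
    intro hx s0
    simp only [List.foldl_cons]
    rcases List.mem_cons.mp hx with h1 | h1
    · subst h1
      split_ifs with hcmp
      · exact pick_ge_start t x
      · exact le_trans (le_of_not_gt hcmp) (pick_ge_start t s0)
    · split_ifs <;> exact ih h1 _

-- the running maximum is an element of the list or the start value
lemma pick_mem_or_start (arr : List String) (s0 : String) :
    (arr.foldl (fun j i => if PySem.Str.len i > PySem.Str.len j then i else j) s0) ∈ arr ∨
    (arr.foldl (fun j i => if PySem.Str.len i > PySem.Str.len j then i else j) s0) = s0 := by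
  induction arr generalizing s0 with
  | nil => right; rfl
  | cons h t ih =>
    simp only [List.foldl_cons]
    split_ifs with hcmp
    · rcases ih h with h1 | h1
      · exact Or.inl (List.mem_cons_of_mem _ h1)
      · left; rw [h1]; exact List.mem_cons_self
    · rcases ih s0 with h1 | h1
      · exact Or.inl (List.mem_cons_of_mem _ h1)
      · exact Or.inr h1

lemma nodup_length_eq {α : Type} [DecidableEq α] (l1 l2 : List α)
    (h1 : l1.Nodup) (h2 : l2.Nodup) (h : ∀ c, c ∈ l1 ↔ c ∈ l2) : l1.length = l2.length :=
  ((List.perm_ext_iff_of_nodup h1 h2).mpr h).length_eq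

-- ===== VERDICT (by name: the statement is the Claim_ definition above) =====
theorem gemstones_spec : Claim_equal_gemstones := by
  intro arr _
  unfold Spec_gemstones
  match arr with
  | [] => rfl
  | h :: rest =>
    have hjmem :
        ((h :: rest).foldl (fun j i => if PySem.Str.len i > PySem.Str.len j then i else j) "")
          ∈ h :: rest := by
      rcases pick_mem_or_start (h :: rest) "" with hm | he
      · exact hm
      · have hlen := pick_len_ge (h :: rest) h List.mem_cons_self ""
        rw [he] at hlen
        have h0 : PySem.Str.len ("" : String) = 0 := by decide
        rw [h0, PySem.Str.len_eq] at hlen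
        have hh : h.toList = [] := by
          have : h.toList.length = 0 := by omega
          exact List.length_eq_zero_iff.mp this
        have hh' : h = "" := by
          have := congrArg String.ofList hh
          simpa using this
        rw [he, hh']
        exact List.mem_cons_self
    have hA := llist_fold_spec (h :: rest)
      ((h :: rest).foldl (fun j i => if PySem.Str.len i > PySem.Str.len j then i else j) "").toList
      [] List.nodup_nil
    have hB := common_fold_spec rest (PySem.Set.ofList h.toList) (PySem.Set.nodup_ofList _)
    show gemstones (h :: rest) = gemstones_alt (h :: rest)
    show ((((h :: rest).foldl (fun j i => if PySem.Str.len i > PySem.Str.len j then i else j) "").toList.foldl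
        (fun llist i =>
          if llist.contains i then llist
          else if gemstonesInner (h :: rest) i = 1 then llist else llist ++ [i]) ([] : List Char)).length : Int)
      = (PySem.Set.len (rest.foldl
          (fun c t => if c = [] then c else c.filter (fun ch => decide (ch ∈ t.toList)))
          (PySem.Set.ofList h.toList)) : Int)
    simp only [PySem.Set.len]
    have hlen := nodup_length_eq _ _ hA.1 hB.1 (fun c => by
      rw [hA.2 c, hB.2 c, PySem.Set.mem_ofList]
      constructor
      · rintro (h' | ⟨h1, h2⟩)
        · cases h'
        · exact ⟨h2 h List.mem_cons_self, fun t ht => h2 t (List.mem_cons_of_mem _ ht)⟩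
      · rintro ⟨h1, h2⟩
        have hall : ∀ k ∈ h :: rest, c ∈ k.toList := by
          intro k hk
          rcases List.mem_cons.mp hk with h' | h'
          · subst h'; exact h1
          · exact h2 k h'
        exact Or.inr ⟨hall _ hjmem, hall⟩)
    exact_mod_cast hlen
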